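-- pv_equiv track=rewrite | github.com/dstern/indel_probes | oligo_functions_1_1.py | get_del_oligo
-- ===== SOURCE A (Python) =====
-- def get_del_oligo(sequence):
--     seq = sequence.replace('-','')
--     oligo = seq[10:70]
--     GC = oligo.count('G') + oligo.count('C') #want between 23 and 30 GC
--     x = 11
--     while x < 40:
--         test_oligo = seq[x:x+60]
--         test_GC = test_oligo.count('G') + test_oligo.count('C')
--
--         if GC < test_GC:
--             GC = test_GC
--             oligo = test_oligo
--         x += 1
--
--     if GC>30:
--         return "skip"
--     elif GC<22:
--         return "skip"
--     else:
--         return oligo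
-- ===== SOURCE B (Python) =====
-- def get_del_oligo(sequence):
--     seq = sequence.replace('-', '')
--     n = len(seq)
--     # prefix GC counts: pref[i] = number of G/C among seq[:i]
--     pref = [0]
--     run = 0
--     for c in seq:
--         if c == 'G' or c == 'C':
--             run += 1
--         pref.append(run)
--
--     def win(x):
--         if x > n:
--             return 0
--         return pref[min(x + 60, n)] - pref[x]
--
--     best = 10
--     best_gc = win(10)
--     for x in range(11, 40):
--         w = win(x)
--         if w > best_gc:
--             best = x
--             best_gc = w
--
--     if best_gc > 30 or best_gc < 22:
--         return "skip"
--     return seq[best:best + 60]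
-- ===== Notes on version B (the rewrite author's own statement) =====
-- stated objective: alternative
-- what changed: B builds a prefix-sum table of G/C counts once and scores each candidate window by two O(1) table lookups while tracking the earliest best start index, instead of re-slicing and re-counting each 60bp window with two .count() passes; measured timing shows no speedup since A's window work is a fixed 30 windows of 60 chars.
import Mathlib
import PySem

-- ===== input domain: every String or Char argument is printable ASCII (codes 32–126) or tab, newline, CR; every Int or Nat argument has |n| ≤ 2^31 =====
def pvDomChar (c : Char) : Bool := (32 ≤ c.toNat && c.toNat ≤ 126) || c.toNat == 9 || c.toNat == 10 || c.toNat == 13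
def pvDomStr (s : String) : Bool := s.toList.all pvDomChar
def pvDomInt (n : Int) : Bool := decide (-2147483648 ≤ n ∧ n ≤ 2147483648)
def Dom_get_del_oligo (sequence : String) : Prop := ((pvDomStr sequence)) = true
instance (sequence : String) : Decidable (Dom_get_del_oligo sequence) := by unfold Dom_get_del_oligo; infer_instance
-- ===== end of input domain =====

-- B scores each 60bp window via a one-pass prefix-sum table of G/C counts instead of
-- re-slicing and re-counting every window (objective: alternative; earliest-max tie-break kept).

-- ===== PORT A =====
def get_del_oligo (sequence : String) : String :=
  let seq := PySem.Str.replace sequence "-" ""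
  let oligo := PySem.Str.slice seq (some 10) (some 70)
  let GC : Int := (PySem.Str.count oligo "G" : Int) + (PySem.Str.count oligo "C" : Int)
  let st := (PySem.List.pyRange 11 40).foldl (fun (st : Int × String) x =>
      let test_oligo := PySem.Str.slice seq (some x) (some (x + 60))
      let test_GC : Int :=
        (PySem.Str.count test_oligo "G" : Int) + (PySem.Str.count test_oligo "C" : Int)
      if st.1 < test_GC then (test_GC, test_oligo) else st) (GC, oligo)
  if st.1 > 30 then "skip"
  else if st.1 < 22 then "skip"
  else st.2

-- ===== PORT B =====
-- one pass over seq accumulating (pref, run): pref[i] = number of G/C among seq[:i]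
def pvPrefStep (st : List Int × Int) (c : Char) : List Int × Int :=
  let run := st.2 + (if c = 'G' ∨ c = 'C' then 1 else 0)
  (st.1 ++ [run], run)

-- win(x): window GC score from two table lookups (the guard x ≤ n keeps them in range)
def pvWin (pref : List Int) (n : Int) (x : Int) : Int :=
  if x > n then 0
  else PySem.List.pyGetD pref (min (x + 60) n) 0 - PySem.List.pyGetD pref x 0

def get_del_oligo_alt (sequence : String) : String :=
  let seq := PySem.Str.replace sequence "-" ""
  let n : Int := PySem.Str.len seq
  let pref := (seq.toList.foldl pvPrefStep ([0], 0)).1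
  let best := (PySem.List.pyRange 11 40).foldl (fun (st : Int × Int) x =>
      let gc := pvWin pref n x
      if gc > st.2 then (x, gc) else st) (10, pvWin pref n 10)
  if best.2 > 30 ∨ best.2 < 22 then "skip"
  else PySem.Str.slice seq (some best.1) (some (best.1 + 60))

-- ===== PRECONDITION & SPEC =====
def Spec_get_del_oligo (sequence : String) (out : String) : Prop := out = get_del_oligo_alt sequence
instance (sequence : String) (out : String) : Decidable (Spec_get_del_oligo sequence out) := by unfold Spec_get_del_oligo; infer_instance

-- ===== CLAIM (what is proved, stated in full; the proofs are below) =====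
def Claim_equal_get_del_oligo : Prop := ∀ (sequence : String), Dom_get_del_oligo sequence → Spec_get_del_oligo sequence (get_del_oligo sequence)

-- ===== LEMMAS AND PROOFS =====



theorem go_single (c : Char) : ∀ (fuel : Nat) (l : List Char) (acc : Nat),
    PySem.Chars.count.go [c] fuel l acc = acc + (l.take fuel).count c := by
  intro fuel
  induction fuel with
  | zero => intro l acc; simp [PySem.Chars.count.go]
  | succ n ih =>
      intro l acc
      cases l with
      | nil => simp [PySem.Chars.count.go]
      | cons h t =>
          rw [PySem.Chars.count.go]
          by_cases hc : h = c
          · simp [hc, List.isPrefixOf, ih]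
            omega
          · simp [List.isPrefixOf, Ne.symm hc, hc, ih]

theorem pvCount_single (l : List Char) (c : Char) :
    PySem.Chars.count l [c] = l.count c := by
  simp [PySem.Chars.count, go_single]

def pvIsGCb (c : Char) : Bool := c = 'G' || c = 'C'

theorem pvGC_eq : (fun c => pvIsGCb c) = fun c : Char => decide (c = 'G') || decide (c = 'C') := by
  funext c; simp [pvIsGCb]

theorem pvCount_window (l : List Char) :
    (l.count 'G' : Int) + (l.count 'C' : Int) = (l.countP (fun c => pvIsGCb c) : Int) := by
  rw [pvGC_eq]
  induction l with
  | nil => simp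
  | cons h t ih =>
      by_cases hg : h = 'G'
      · simp [hg]; omega
      · by_cases hc : h = 'C'
        · simp [hc]; omega
        · simp [hg, hc, ih]

theorem pvPref_spec (L : List Char) : ∀ (p : List Int) (r : Int),
    (L.foldl pvPrefStep (p, r)).1 =
      p ++ (List.range L.length).map
        (fun i => r + ((L.take (i + 1)).countP (fun c => pvIsGCb c) : Int)) := by
  simp only [pvGC_eq]
  induction L with
  | nil => simp
  | cons h t ih =>
      intro p r
      simp only [List.foldl_cons, pvPrefStep]
      rw [ih]
      simp [List.range_succ_eq_map, List.countP_cons]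
      intro i hi
      split_ifs <;> ring

theorem pvPref_getD (L : List Char) (i : Nat) (h : i ≤ L.length) :
    ((L.foldl pvPrefStep (([0] : List Int), (0 : Int))).1).getD i 0 =
      ((L.take i).countP (fun c => pvIsGCb c) : Int) := by
  rw [pvPref_spec]
  cases i with
  | zero => simp
  | succ j =>
      have hj : j < L.length := by omega
      simp [List.getD, hj]

theorem pvWin_eq (L : List Char) (k : Nat) :
    pvWin ((L.foldl pvPrefStep (([0] : List Int), (0 : Int))).1) (L.length : Int) (k : Int) =
      (((L.drop k).take 60).countP (fun c => pvIsGCb c) : Int) := by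
  unfold pvWin
  by_cases hk : (k : Int) > (L.length : Int)
  · have : L.drop k = [] := List.drop_eq_nil_of_le (by exact_mod_cast le_of_lt hk)
    simp [hk, this]
  · have hk' : k ≤ L.length := by exact_mod_cast not_lt.mp hk
    have hmin : min ((k : Int) + 60) (L.length : Int) = ((min (k + 60) L.length : Nat) : Int) := by
      push_cast; omega
    rw [if_neg hk, hmin]
    rw [show ((min (k + 60) L.length : Nat) : Int) = ((min (k + 60) L.length : Nat) : Int) from rfl]
    rw [PySem.List.pyGetD_natCast, PySem.List.pyGetD_natCast]
    rw [pvPref_getD L _ (by omega), pvPref_getD L _ hk']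
    have hsplit : L.take (min (k + 60) L.length) = L.take k ++ (L.drop k).take (min (k + 60) L.length - k) := by
      rw [← List.take_add]
      congr 1
      omega
    rw [hsplit, List.countP_append]
    have htake : (L.drop k).take (min (k + 60) L.length - k) = (L.drop k).take 60 := by
      by_cases h1 : k + 60 ≤ L.length
      · congr 1; omega
      · rw [List.take_of_length_le, List.take_of_length_le] <;> simp <;> omega

    rw [htake]
    push_cast
    ring

theorem pvWindow_eq (seq : String) (x : Int) (hx : 0 ≤ x) :
    (PySem.Str.count (PySem.Str.slice seq (some x) (some (x + 60))) "G" : Int)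
      + (PySem.Str.count (PySem.Str.slice seq (some x) (some (x + 60))) "C" : Int)
    = pvWin ((seq.toList.foldl pvPrefStep (([0] : List Int), (0 : Int))).1) (PySem.Str.len seq) x := by
  obtain ⟨k, rfl⟩ := Int.eq_ofNat_of_zero_le hx
  rw [PySem.Str.len_eq, PySem.Str.count_eq, PySem.Str.count_eq, PySem.Str.toList_slice]
  rw [PySem.Chars.slice_eq_listSlice]
  rw [show ((k : Int) + 60) = ((k : Int) + ((60 : Nat) : Int)) by norm_num]
  rw [PySem.List.slice_natCast_add]
  rw [show ("G" : String).toList = ['G'] from rfl, show ("C" : String).toList = ['C'] from rfl]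
  rw [pvCount_single, pvCount_single, pvCount_window, pvWin_eq]

theorem pvFoldl_rel {α β γ : Type} (R : β → γ → Prop) (f : β → α → β) (g : γ → α → γ)
    (l : List α) (b : β) (c : γ) (h : R b c)
    (hs : ∀ b c a, a ∈ l → R b c → R (f b a) (g c a)) :
    R (l.foldl f b) (l.foldl g c) := by
  induction l generalizing b c with
  | nil => exact h
  | cons a t ih =>
      exact ih _ _ (hs b c a (by simp) h) (fun b c a ha => hs b c a (by simp [ha]))

set_option maxHeartbeats 1000000 in

theorem pvMain (sequence : String) : get_del_oligo sequence = get_del_oligo_alt sequence := by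
  simp only [get_del_oligo, get_del_oligo_alt]
  set seq := PySem.Str.replace sequence "-" "" with hseq
  set pref := (seq.toList.foldl pvPrefStep (([0] : List Int), (0 : Int))).1 with hpref
  set n : Int := PySem.Str.len seq with hn
  have hrel :
      (fun (a : Int × String) (b : Int × Int) =>
        a.1 = b.2 ∧ a.2 = PySem.Str.slice seq (some b.1) (some (b.1 + 60)))
      ((PySem.List.pyRange 11 40).foldl (fun (st : Int × String) x =>
        let test_oligo := PySem.Str.slice seq (some x) (some (x + 60))
        let test_GC : Int :=
          (PySem.Str.count test_oligo "G" : Int) + (PySem.Str.count test_oligo "C" : Int)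
        if st.1 < test_GC then (test_GC, test_oligo) else st)
        ((PySem.Str.count (PySem.Str.slice seq (some 10) (some 70)) "G" : Int)
          + (PySem.Str.count (PySem.Str.slice seq (some 10) (some 70)) "C" : Int),
         PySem.Str.slice seq (some 10) (some 70)))
      ((PySem.List.pyRange 11 40).foldl (fun (st : Int × Int) x =>
        let gc := pvWin pref n x
        if gc > st.2 then (x, gc) else st) (10, pvWin pref n 10)) := by
    refine pvFoldl_rel
      (fun (a : Int × String) (b : Int × Int) =>
        a.1 = b.2 ∧ a.2 = PySem.Str.slice seq (some b.1) (some (b.1 + 60)))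
      (fun (st : Int × String) x =>
        let test_oligo := PySem.Str.slice seq (some x) (some (x + 60))
        let test_GC : Int :=
          (PySem.Str.count test_oligo "G" : Int) + (PySem.Str.count test_oligo "C" : Int)
        if st.1 < test_GC then (test_GC, test_oligo) else st)
      (fun (st : Int × Int) x =>
        let gc := pvWin pref n x
        if gc > st.2 then (x, gc) else st)
      (PySem.List.pyRange 11 40) _ _ ?_ ?_
    · constructor
      · rw [show (70 : Int) = (10 : Int) + 60 by norm_num]
        exact pvWindow_eq seq 10 (by norm_num)
      · norm_num
    · intro a b x hx hR
      have hx' := (PySem.List.mem_pyRange_iff_of_pos (by norm_num) x).mp hx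
      have hx0 : (0 : Int) ≤ x := by omega
      obtain ⟨h1, h2⟩ := hR
      simp only
      rw [← pvWindow_eq seq x hx0, h1]
      split_ifs with hcond
      · exact ⟨rfl, rfl⟩
      · exact ⟨h1, h2⟩
  obtain ⟨h1, h2⟩ := hrel
  rw [h1, h2]
  generalize (List.foldl (fun (st : Int × Int) x =>
        let gc := pvWin pref n x
        if gc > st.2 then (x, gc) else st) (10, pvWin pref n 10) (PySem.List.pyRange 11 40)) = B
  split_ifs with c1 c2 c3 <;> first | rfl | omega

-- ===== VERDICT (by name: the statement is the Claim_ definition above) =====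
theorem get_del_oligo_spec : Claim_equal_get_del_oligo := by
  intro sequence _
  exact pvMain sequence
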